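-- pv_equiv track=rewrite | github.com/johnrobyclayton/factorisation-poject | modsearch.py | primemoddiff
-- ===== SOURCE A (Python) =====
-- def primemoddiff(p,m):
--     toreturn=set()
--     for i in range(1,p):
--         for j in range(1,p):
--             if (i*j)%p==m:
--                 toreturn.add((p-i+j)%p)
--                 toreturn.add((p-j+i)%p)
--     return toreturn
-- ===== SOURCE B (Python) =====
-- def _egcd(a, b):
--     # extended Euclid: returns (g, x, y) with g = gcd(a, b) and a*x + b*y == g (for a, b >= 0)
--     if b == 0:
--         return (a, 1, 0)
--     g, x, y = _egcd(b, a % b)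
--     return (g, y, x - (a // b) * y)
--
-- def primemoddiff(p, m):
--     out = set()
--     if m < 0 or m >= p:
--         return out
--     for i in range(1, p):
--         g, x, _ = _egcd(i, p)
--         if m % g == 0:
--             q = p // g
--             j0 = (x * (m // g)) % q
--             start = j0 if j0 > 0 else q
--             for j in range(start, p, q):
--                 out.add((p - i + j) % p)
--                 out.add((p - j + i) % p)
--     return out
-- ===== Notes on version B (the rewrite author's own statement) =====
-- stated objective: faster
-- what changed: B drops A's inner scan over all j: for each i it solves the linear congruence i*j = m (mod p) with extended Euclid and enumerates only the arithmetic progression of solutions j in range(start, p, p//gcd(i,p)).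
import Mathlib
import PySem

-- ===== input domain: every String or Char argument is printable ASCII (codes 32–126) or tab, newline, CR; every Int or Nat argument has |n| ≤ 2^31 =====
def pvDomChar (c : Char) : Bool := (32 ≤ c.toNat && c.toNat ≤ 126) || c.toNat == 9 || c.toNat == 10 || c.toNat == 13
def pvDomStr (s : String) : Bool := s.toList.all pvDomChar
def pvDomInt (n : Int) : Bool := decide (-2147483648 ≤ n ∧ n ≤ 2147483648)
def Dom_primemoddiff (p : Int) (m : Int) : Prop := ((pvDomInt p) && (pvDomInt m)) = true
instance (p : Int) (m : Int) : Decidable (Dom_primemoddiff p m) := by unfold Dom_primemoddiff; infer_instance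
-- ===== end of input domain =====

-- B replaces A's O(p^2) double loop by solving the linear congruence i*j ≡ m (mod p)
-- with extended Euclid for each i (objective: faster).


-- ===== PORT A =====
def primemoddiff (p : Int) (m : Int) : List Int :=
  (PySem.List.pyRange 1 p 1).foldl (fun toreturn i =>
    (PySem.List.pyRange 1 p 1).foldl (fun toreturn j =>
      if PySem.Int.mod (i * j) p = m then
        PySem.Set.add (PySem.Set.add toreturn (PySem.Int.mod (p - i + j) p))
          (PySem.Int.mod (p - j + i) p)
      else toreturn) toreturn) (PySem.Set.empty : PySem.Set Int)

-- ===== PORT B =====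
-- termination fact for egcd (|a % b| < |b| for b ≠ 0), cited in decreasing_by
theorem egcd_dec (a b : Int) (hb : ¬ b = 0) : (PySem.Int.mod a b).natAbs < b.natAbs := by
  rcases lt_or_gt_of_ne hb with h | h
  · have := PySem.Int.mod_neg_bounds a h; omega
  · have h1 := PySem.Int.mod_nonneg a h; have h2 := PySem.Int.mod_lt a h; omega

-- extended Euclid (transliteration of _egcd): (g, x, y) with g = gcd(a, b), a*x + b*y = g
def egcd (a b : Int) : Int × Int × Int :=
  if hb : b = 0 then (a, 1, 0)
  else
    let r := egcd b (PySem.Int.mod a b)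
    (r.1, r.2.2, r.2.1 - PySem.Int.floordiv a b * r.2.2)
termination_by b.natAbs
decreasing_by exact egcd_dec a b hb

def primemoddiff_alt (p : Int) (m : Int) : List Int :=
  let out : PySem.Set Int := PySem.Set.empty
  if m < 0 ∨ p ≤ m then out
  else
    (PySem.List.pyRange 1 p 1).foldl (fun out i =>
      let e := egcd i p
      if PySem.Int.mod m e.1 = 0 then
        let q := PySem.Int.floordiv p e.1
        let j0 := PySem.Int.mod (e.2.1 * PySem.Int.floordiv m e.1) q
        let start := if 0 < j0 then j0 else q
        (PySem.List.pyRange start p q).foldl (fun out j =>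
          PySem.Set.add (PySem.Set.add out (PySem.Int.mod (p - i + j) p))
            (PySem.Int.mod (p - j + i) p)) out
      else out) out

-- ===== PRECONDITION & SPEC =====
def Spec_primemoddiff (p : Int) (m : Int) (out : List Int) : Prop := out = primemoddiff_alt p m
instance (p : Int) (m : Int) (out : List Int) : Decidable (Spec_primemoddiff p m out) := by unfold Spec_primemoddiff; infer_instance

-- ===== CLAIM (what is proved, stated in full; the proofs are below) =====
def Claim_equal_primemoddiff : Prop := ∀ (p : Int) (m : Int), Dom_primemoddiff p m → Spec_primemoddiff p m (primemoddiff p m)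

-- ===== LEMMAS AND PROOFS =====

-- the two set-insertions both loops perform for a matching pair (i, j)
def pmdAdd (p i : Int) (t : PySem.Set Int) (j : Int) : PySem.Set Int :=
  PySem.Set.add (PySem.Set.add t (PySem.Int.mod (p - i + j) p)) (PySem.Int.mod (p - j + i) p)

theorem egcd_spec (a b : Int) : 0 ≤ a → 0 ≤ b →
    (egcd a b).1 = Int.gcd a b ∧ a * (egcd a b).2.1 + b * (egcd a b).2.2 = (egcd a b).1 := by
  induction a, b using egcd.induct with
  | case1 a =>
      intro ha _
      simp [egcd, Int.natAbs_of_nonneg ha]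
  | case2 a b hb0 ih =>
      intro ha hb
      have hbpos : 0 < b := lt_of_le_of_ne hb (Ne.symm hb0)
      have hmod : PySem.Int.mod a b = a % b := PySem.Int.mod_eq_emod_of_pos hbpos
      have hmn : 0 ≤ PySem.Int.mod a b := PySem.Int.mod_nonneg a hbpos
      obtain ⟨ihg, ihb⟩ := ih hb hmn
      rw [egcd]; simp only [hb0, dite_false]
      refine ⟨?_, ?_⟩
      · simpa using ihg.trans (by rw [hmod, Int.gcd_comm b, Int.gcd_emod])
      · have hfd := PySem.Int.floordiv_mul_add_mod a b
        linear_combination ihb - (egcd b (PySem.Int.mod a b)).2.2 * hfd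

-- strict monotonicity of a positive-step range
theorem pairwise_lt_pyRange_pos (a b : Int) {s : Int} (hs : 0 < s) :
    (PySem.List.pyRange a b s).Pairwise (· < ·) := by
  rw [PySem.List.pyRange_of_pos a b hs, List.pairwise_map]
  refine List.pairwise_lt_range.imp ?_
  intro k1 k2 h
  have hk : (k1 : Int) < (k2 : Int) := by exact_mod_cast h
  nlinarith

-- (i*j) % p = m  ↔  j ≡ j0 (mod q), for 0 ≤ m < p and the Bézout data of i and p
theorem cond_iff (p m i g x y q j0 : Int) (h0m : 0 ≤ m) (hmp : m < p)
    (hi : 1 ≤ i) (hip : i < p)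
    (hgpos : 0 < g) (hgi : g ∣ i) (hgp : g ∣ p) (hbez : i * x + p * y = g)
    (hq : q = p / g) (hj0 : j0 = (x * (m / g)) % q) (hdm : g ∣ m) (j : Int) :
    (PySem.Int.mod (i * j) p = m ↔ q ∣ (j - j0)) := by
  have hp0 : 0 < p := by omega
  have hg0 : g ≠ 0 := ne_of_gt hgpos
  obtain ⟨q', hpq'⟩ := hgp
  have hqq : q = q' := by rw [hq, hpq', Int.mul_ediv_cancel_left _ hg0]
  subst hqq
  have hpq : p = g * q := hpq'
  have hqpos : 0 < q := by nlinarith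
  obtain ⟨i', hii⟩ := hgi
  obtain ⟨m', hmm⟩ := hdm
  have hmg : m / g = m' := by rw [hmm, Int.mul_ediv_cancel_left _ hg0]
  rw [hmg] at hj0
  have hred : i' * x + q * y = 1 := by
    have : g * (i' * x + q * y) = g * 1 := by linear_combination hbez - x * hii - y * hpq
    exact mul_left_cancel₀ hg0 this
  have ht1 : x * m' - j0 = q * ((x * m') / q) := by
    rw [hj0]; linear_combination - Int.mul_ediv_self (x * m') q
  have hmodm : PySem.Int.mod (i * j) p = (i * j) % p := PySem.Int.mod_eq_emod_of_pos hp0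
  rw [hmodm]
  constructor
  · intro hcd
    have hm' : m % p = m := Int.emod_eq_of_lt h0m hmp
    have hpd : p ∣ i * j - m := by
      have h0 : (i * j - m) % p = 0 := by
        rw [← Int.emod_eq_emod_iff_emod_sub_eq_zero, hcd, hm']
      exact Int.dvd_of_emod_eq_zero h0
    have hqd : q ∣ i' * j - m' := by
      have : g * q ∣ g * (i' * j - m') := by
        rw [← hpq]; convert hpd using 1; rw [hii, hmm]; ring
      exact (mul_dvd_mul_iff_left hg0).mp this
    obtain ⟨t2, ht2⟩ := hqd
    exact ⟨x * t2 + (x * m') / q + y * j, by linear_combination x * ht2 + ht1 - j * hred⟩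
  · intro ⟨t, ht⟩
    have hdd : i * j - m = p * (i' * t - m' * y - i' * ((x * m') / q)) := by
      rw [hpq, hii, hmm]
      linear_combination (g * i') * ht - (g * i') * ht1 + (g * m') * hred
    have hpd : p ∣ i * j - m := ⟨_, hdd⟩
    have hm' : m % p = m := Int.emod_eq_of_lt h0m hmp
    rw [← hm', Int.emod_eq_emod_iff_emod_sub_eq_zero]
    simpa [Int.emod_emod_of_dvd] using Int.emod_eq_zero_of_dvd hpd

-- the j in [1, p) with (i*j) % p = m are exactly range(start, p, q)
theorem filter_eq (p m i g x y q j0 : Int) (h0m : 0 ≤ m) (hmp : m < p)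
    (hi : 1 ≤ i) (hip : i < p)
    (hgpos : 0 < g) (hgi : g ∣ i) (hgp : g ∣ p) (hbez : i * x + p * y = g)
    (hq : q = p / g) (hj0 : j0 = (x * (m / g)) % q) (hdm : g ∣ m) :
    (PySem.List.pyRange 1 p 1).filter (fun j => decide (PySem.Int.mod (i * j) p = m))
      = PySem.List.pyRange (if 0 < j0 then j0 else q) p q := by
  have hp0 : 0 < p := by omega
  have hg0 : g ≠ 0 := ne_of_gt hgpos
  have hqpos : 0 < q := by
    obtain ⟨q', hpq'⟩ := hgp
    have hqq : q = q' := by rw [hq, hpq', Int.mul_ediv_cancel_left _ hg0]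
    nlinarith [hqq ▸ hpq']
  have hj0b : 0 ≤ j0 ∧ j0 < q := by
    constructor
    · rw [hj0]; exact Int.emod_nonneg _ (ne_of_gt hqpos)
    · rw [hj0]; exact Int.emod_lt_of_pos _ hqpos
  set start := if 0 < j0 then j0 else q with hstart
  have hstart1 : 1 ≤ start ∧ start ≤ q := by
    by_cases h : 0 < j0 <;> simp [hstart, h] <;> omega
  have hstartmod : q ∣ start - j0 := by
    by_cases h : 0 < j0
    · simp [hstart, h]
    · have hz : j0 = 0 := by omega
      simp [hstart, hz]
  have hmem : ∀ k, (k ∈ (PySem.List.pyRange 1 p 1).filter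
        (fun j => decide (PySem.Int.mod (i * j) p = m)))
      ↔ k ∈ PySem.List.pyRange start p q := by
    intro k
    rw [List.mem_filter, PySem.List.mem_pyRange_one, PySem.List.mem_pyRange_iff_of_pos hqpos,
      decide_eq_true_eq,
      cond_iff p m i g x y q j0 h0m hmp hi hip hgpos hgi hgp hbez hq hj0 hdm k]
    constructor
    · rintro ⟨⟨hk1, hkp⟩, t, ht⟩
      obtain ⟨u, hu⟩ := hstartmod
      refine ⟨?_, hkp, t - u, by linear_combination ht - hu⟩
      by_contra hlt
      push Not at hlt
      rcases lt_or_ge t 0 with htn | htn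
      · have : q * t ≤ q * (-1) := mul_le_mul_of_nonneg_left (by omega) (le_of_lt hqpos)
        omega
      · have h4 : q * t ≥ 0 := mul_nonneg (le_of_lt hqpos) htn
        rcases lt_or_ge t 1 with ht1 | ht1
        · have hz : t = 0 := by omega
          subst hz
          by_cases h : 0 < j0
          · simp [hstart, h] at hlt; omega
          · have hz0 : j0 = 0 := by omega
            omega
        · have : q * t ≥ q * 1 := mul_le_mul_of_nonneg_left (by omega) (le_of_lt hqpos)
          omega
    · rintro ⟨hks, hkp, t, ht⟩
      obtain ⟨u, hu⟩ := hstartmod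
      exact ⟨⟨by omega, hkp⟩, t + u, by linear_combination ht + hu⟩
  have pw1 : ((PySem.List.pyRange 1 p 1).filter
      (fun j => decide (PySem.Int.mod (i * j) p = m))).Pairwise (· < ·) :=
    List.Pairwise.filter _ (PySem.List.pairwise_lt_pyRange_one 1 p)
  have pw2 : (PySem.List.pyRange start p q).Pairwise (· < ·) :=
    pairwise_lt_pyRange_pos start p hqpos
  have nd1 : ((PySem.List.pyRange 1 p 1).filter
      (fun j => decide (PySem.Int.mod (i * j) p = m))).Nodup := pw1.imp ne_of_lt
  have nd2 : (PySem.List.pyRange start p q).Nodup := pw2.imp ne_of_lt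
  exact List.Perm.eq_of_pairwise (fun a b _ _ h1 h2 => ((lt_asymm h1) h2).elim) pw1 pw2
    ((List.perm_ext_iff_of_nodup nd1 nd2).mpr hmem)

-- if gcd(i, p) does not divide m, no j matches
theorem no_match (p m i j : Int) (h0m : 0 ≤ m) (hmp : m < p)
    (hnd : ¬ ((Int.gcd i p : Int) ∣ m)) : ¬ (PySem.Int.mod (i * j) p = m) := by
  intro hcd
  have hp0 : 0 < p := by omega
  rw [PySem.Int.mod_eq_emod_of_pos hp0] at hcd
  have hm' : m % p = m := Int.emod_eq_of_lt h0m hmp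
  have hpd : p ∣ i * j - m := Int.dvd_of_emod_eq_zero
    (by rw [← Int.emod_eq_emod_iff_emod_sub_eq_zero, hcd, hm'])
  apply hnd
  have h1 : (Int.gcd i p : Int) ∣ i * j - m := dvd_trans (Int.gcd_dvd_right i p) hpd
  have h2 : (Int.gcd i p : Int) ∣ i * j := Dvd.dvd.mul_right (Int.gcd_dvd_left i p) j
  simpa using h2.sub h1

-- per-i: A's inner scan over all j equals B's congruence-solving body for i
theorem inner_eq (p m i : Int) (h0m : 0 ≤ m) (hmp : m < p) (hi : 1 ≤ i) (hip : i < p)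
    (s : PySem.Set Int) :
    (PySem.List.pyRange 1 p 1).foldl
        (fun t j => if PySem.Int.mod (i * j) p = m then pmdAdd p i t j else t) s
      = (if PySem.Int.mod m (egcd i p).1 = 0 then
           (PySem.List.pyRange
             (if 0 < PySem.Int.mod ((egcd i p).2.1 * PySem.Int.floordiv m (egcd i p).1)
                     (PySem.Int.floordiv p (egcd i p).1)
              then PySem.Int.mod ((egcd i p).2.1 * PySem.Int.floordiv m (egcd i p).1)
                     (PySem.Int.floordiv p (egcd i p).1)
              else PySem.Int.floordiv p (egcd i p).1)
             p (PySem.Int.floordiv p (egcd i p).1)).foldl (pmdAdd p i) s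
         else s) := by
  have hp0 : 0 < p := by omega
  obtain ⟨hg, hbez⟩ := egcd_spec i p (by omega) (by omega)
  have hgcdpos : 0 < (Int.gcd i p : Int) := by
    have : 0 < Int.gcd i p := Int.gcd_pos_of_ne_zero_left p (by omega)
    exact_mod_cast this
  have hgpos : 0 < (egcd i p).1 := by rw [hg]; exact hgcdpos
  have hfdp : PySem.Int.floordiv p (egcd i p).1 = p / (egcd i p).1 :=
    PySem.Int.floordiv_eq_ediv_of_pos hgpos
  have hfdm : PySem.Int.floordiv m (egcd i p).1 = m / (egcd i p).1 :=
    PySem.Int.floordiv_eq_ediv_of_pos hgpos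
  have hgi : (egcd i p).1 ∣ i := hg ▸ Int.gcd_dvd_left i p
  have hgp : (egcd i p).1 ∣ p := hg ▸ Int.gcd_dvd_right i p
  have hqpos : 0 < p / (egcd i p).1 := Int.ediv_pos_of_pos_of_dvd hp0 (le_of_lt hgpos) hgp
  have hmodq : ∀ a : Int, PySem.Int.mod a (PySem.Int.floordiv p (egcd i p).1)
      = a % (p / (egcd i p).1) := by
    intro a; rw [hfdp]; exact PySem.Int.mod_eq_emod_of_pos hqpos
  by_cases hdm : PySem.Int.mod m (egcd i p).1 = 0
  · rw [if_pos hdm]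
    have hdvd : (egcd i p).1 ∣ m := (PySem.Int.mod_eq_zero_iff_dvd m _).mp hdm
    have h1 : (PySem.List.pyRange 1 p 1).foldl
        (fun t j => if PySem.Int.mod (i * j) p = m then pmdAdd p i t j else t) s
        = (PySem.List.pyRange 1 p 1).foldl
        (fun t j => if (fun j => decide (PySem.Int.mod (i * j) p = m)) j = true
                    then pmdAdd p i t j else t) s := by
      refine PySem.List.foldl_congr_mem' _ _ _ _ ?_
      intro j _ t
      by_cases h : PySem.Int.mod (i * j) p = m <;> simp [h]
    rw [h1, ← List.foldl_filter,
      filter_eq p m i (egcd i p).1 (egcd i p).2.1 (egcd i p).2.2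
        (p / (egcd i p).1) (((egcd i p).2.1 * (m / (egcd i p).1)) % (p / (egcd i p).1))
        h0m hmp hi hip hgpos hgi hgp hbez rfl rfl hdvd,
      hmodq, hfdm, hfdp]
  · rw [if_neg hdm]
    have hnd : ¬ ((Int.gcd i p : Int) ∣ m) := by
      rw [← hg]
      exact fun h => hdm ((PySem.Int.mod_eq_zero_iff_dvd m _).mpr h)
    refine (PySem.List.foldl_congr_mem' _ _ (fun t _ => t) s ?_).trans (List.foldl_fixed _)
    intro j hj t
    rw [if_neg (no_match p m i j h0m hmp hnd)]

-- ===== VERDICT (by name: the statement is the Claim_ definition above) =====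
theorem primemoddiff_spec : Claim_equal_primemoddiff := by
  intro p m _
  unfold Spec_primemoddiff
  simp only [primemoddiff, primemoddiff_alt]
  by_cases hm : m < 0 ∨ p ≤ m
  · rw [if_pos hm]
    refine (PySem.List.foldl_congr_mem' _ _ (fun t _ => t) _ ?_).trans (List.foldl_fixed _)
    intro i hi t
    rw [PySem.List.mem_pyRange_one] at hi
    have hp0 : 0 < p := by omega
    refine (PySem.List.foldl_congr_mem' _ _ (fun t _ => t) _ ?_).trans (List.foldl_fixed _)
    intro j hj u
    have hnn := PySem.Int.mod_nonneg (i * j) hp0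
    have hlt := PySem.Int.mod_lt (i * j) hp0
    rw [if_neg (by omega)]
  · rw [if_neg hm]
    refine PySem.List.foldl_congr_mem' _ _ _ _ ?_
    intro i hi acc
    rw [PySem.List.mem_pyRange_one] at hi
    exact inner_eq p m i (by omega) (by omega) hi.1 hi.2 acc
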